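-- pv_equiv track=rewrite | github.com/serien-zzx/BioGSF | re/src/models/gat_neg_entitymarker_model.py | make_graph
-- ===== SOURCE A (Python) =====
-- def make_graph(batch_ent):
--     # 默认思考gpu卡的个数为2
--     graph = [[0 for i in range(len(batch_ent))] for i in range(len(batch_ent))]
--
--     for j in range(len(batch_ent)):
--         e1 = batch_ent[j]['e1']
--         e2 = batch_ent[j]['e2']
--         for k in range(j+1,len(batch_ent)):
--             if e1 == batch_ent[k]['e1'] or e2 == batch_ent[k]['e2']:
--                 graph[j][k] = 1
--                 graph[k][j] = 1
--
--     return graph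
-- ===== SOURCE B (Python) =====
-- def make_graph(batch_ent):
--     n = len(batch_ent)
--     graph = [[0] * n for _ in range(n)]
--     for key in ('e1', 'e2'):
--         groups = {}
--         for i, ent in enumerate(batch_ent):
--             groups.setdefault(ent[key], []).append(i)
--         for group in groups.values():
--             for a in group:
--                 for b in group:
--                     if a != b:
--                         graph[a][b] = 1
--     return graph
-- ===== Notes on version B (the rewrite author's own statement) =====
-- stated objective: alternative
-- what changed: Replaces A's all-pairs nested scan with per-key string comparisons by first building two hash indexes (e1 value -> indices, e2 value -> indices) and then writing edges only within each group, so the inner comparison scan disappears.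
import Mathlib
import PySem

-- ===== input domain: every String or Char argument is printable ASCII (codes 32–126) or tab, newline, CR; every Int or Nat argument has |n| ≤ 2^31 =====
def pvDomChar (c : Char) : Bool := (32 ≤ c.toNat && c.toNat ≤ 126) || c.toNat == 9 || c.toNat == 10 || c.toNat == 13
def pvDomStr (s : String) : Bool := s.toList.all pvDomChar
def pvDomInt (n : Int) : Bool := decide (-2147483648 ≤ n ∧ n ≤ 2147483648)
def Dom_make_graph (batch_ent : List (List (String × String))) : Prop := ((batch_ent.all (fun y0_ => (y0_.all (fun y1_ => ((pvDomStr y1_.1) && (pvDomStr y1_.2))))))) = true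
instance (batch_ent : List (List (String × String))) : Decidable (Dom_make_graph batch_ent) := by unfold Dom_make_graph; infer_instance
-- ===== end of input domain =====

-- B replaces A's all-pairs scan with a group-by-key index (two dicts value → indices) and fills edges
-- only inside each group; equivalence of the return value is proved under Pre_ (every entry has keys "e1" and "e2").

-- shared primitive helpers (both Pythons do `d[key]` and `graph[r][c] = 1` with in-range indices)
-- dictGet d k: Python d[k]; the "" default is unreachable under Pre_ (missing key = KeyError, excluded)
def dictGet (d : List (String × String)) (k : String) : String := (PySem.Dict.mk d).getD k ""
-- setC m r c: `m[r][c] = 1`; exact for the 0 ≤ r,c < len indices both programs use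
def setC (m : List (List Int)) (r c : Int) : List (List Int) :=
  PySem.List.pySetD m r (PySem.List.pySetD (PySem.List.pyGetD m r []) c 1)

-- ===== PORT A =====
def make_graph (batch_ent : List (List (String × String))) : List (List Int) :=
  let n : Int := batch_ent.length
  let graph := (PySem.List.pyRange 0 n 1).map (fun _ => (PySem.List.pyRange 0 n 1).map (fun _ => (0 : Int)))
  (PySem.List.pyRange 0 n 1).foldl (fun g j =>
    let e1 := dictGet (PySem.List.pyGetD batch_ent j []) "e1"
    let e2 := dictGet (PySem.List.pyGetD batch_ent j []) "e2"
    (PySem.List.pyRange (j + 1) n 1).foldl (fun g k =>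
      if e1 = dictGet (PySem.List.pyGetD batch_ent k []) "e1" ∨
         e2 = dictGet (PySem.List.pyGetD batch_ent k []) "e2" then
        setC (setC g j k) k j
      else g) g) graph

-- ===== PORT B =====
-- groups.setdefault(ent[key], []).append(i) over enumerate(batch_ent)
def bGroups (batch_ent : List (List (String × String))) (key : String) : PySem.Dict String (List Int) :=
  (PySem.List.enumerate batch_ent 0).foldl
    (fun d p => d.modify (dictGet p.2 key) [] (· ++ [p.1])) PySem.Dict.empty

def make_graph_alt (batch_ent : List (List (String × String))) : List (List Int) :=
  let n : Int := batch_ent.length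
  let graph := (PySem.List.pyRange 0 n 1).map (fun _ => PySem.List.pyRepeat [(0 : Int)] n)
  ["e1", "e2"].foldl (fun g key =>
    let groups := bGroups batch_ent key
    groups.values.foldl (fun g grp =>
      grp.foldl (fun g a =>
        grp.foldl (fun g b => if a ≠ b then setC g a b else g) g) g) g) graph

-- ===== PRECONDITION & SPEC =====
-- Pre_ excludes exactly the inputs where the Python A raises KeyError: some entry lacks key "e1" or "e2".
def Pre_make_graph (batch_ent : List (List (String × String))) : Prop :=
  (batch_ent.all (fun d => (PySem.Dict.mk d).contains "e1" && (PySem.Dict.mk d).contains "e2")) = true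
instance (batch_ent : List (List (String × String))) : Decidable (Pre_make_graph batch_ent) := by unfold Pre_make_graph; infer_instance

def pvWitness_make_graph : (List (List (String × String))) :=
  [[("e1", "a"), ("e2", "x")], [("e1", "a"), ("e2", "y")], [("e1", "b"), ("e2", "y")]]

def Spec_make_graph (batch_ent : List (List (String × String))) (out : List (List Int)) : Prop := out = make_graph_alt batch_ent
instance (batch_ent : List (List (String × String))) (out : List (List Int)) : Decidable (Spec_make_graph batch_ent out) := by unfold Spec_make_graph; infer_instance

-- ===== CLAIM (what is proved, stated in full; the proofs are below) =====
def Claim_equal_make_graph : Prop := ∀ (batch_ent : List (List (String × String))), Dom_make_graph batch_ent → Pre_make_graph batch_ent → Spec_make_graph batch_ent (make_graph batch_ent)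

-- ===== LEMMAS AND PROOFS =====

-- proof-side framework
def getC (m : List (List Int)) (r c : Int) : Int :=
  PySem.List.pyGetD (PySem.List.pyGetD m r []) c 0

def Shape (m : List (List Int)) (n : Nat) : Prop :=
  m.length = n ∧ ∀ i : Nat, i < n → (PySem.List.pyGetD m (i : Int) []).length = n

def applyOps (ops : List (Int × Int)) (m : List (List Int)) : List (List Int) :=
  ops.foldl (fun m p => setC m p.1 p.2) m

def InB (n : Nat) (p : Int × Int) : Prop :=
  0 ≤ p.1 ∧ p.1 < (n : Int) ∧ 0 ≤ p.2 ∧ p.2 < (n : Int)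

theorem shape_setC {m : List (List Int)} {n : Nat} (hS : Shape m n) {r c : Int}
    (hp : InB n (r, c)) : Shape (setC m r c) n := by
  obtain ⟨hr0, hrn, hc0, hcn⟩ := hp
  obtain ⟨hlen, hrow⟩ := hS
  simp only at hr0 hrn hc0 hcn
  obtain ⟨R, rfl⟩ : ∃ R : Nat, r = (R : Int) := ⟨r.toNat, by omega⟩
  have hR : R < m.length := by omega
  refine ⟨by simp [setC, hlen], ?_⟩
  intro i hi
  rw [setC, PySem.List.pyGetD_pySetD_natCast _ _ _ _ _ hR]
  split
  · rw [PySem.List.length_pySetD]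
    exact hrow R (by omega)
  · exact hrow i hi

theorem getC_setC {m : List (List Int)} {n : Nat} (hS : Shape m n) {r c : Int}
    (hp : InB n (r, c)) (a b : Int) (ha : 0 ≤ a) (hb : 0 ≤ b) :
    getC (setC m r c) a b = if a = r ∧ b = c then 1 else getC m a b := by
  obtain ⟨hr0, hrn, hc0, hcn⟩ := hp
  obtain ⟨hlen, hrow⟩ := hS
  simp only at hr0 hrn hc0 hcn
  obtain ⟨R, rfl⟩ : ∃ R : Nat, r = (R : Int) := ⟨r.toNat, by omega⟩
  obtain ⟨C, rfl⟩ : ∃ C : Nat, c = (C : Int) := ⟨c.toNat, by omega⟩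
  obtain ⟨A, rfl⟩ : ∃ A : Nat, a = (A : Int) := ⟨a.toNat, by omega⟩
  obtain ⟨B, rfl⟩ : ∃ B : Nat, b = (B : Int) := ⟨b.toNat, by omega⟩
  have hR : R < m.length := by omega
  have hC : C < (PySem.List.pyGetD m (R : Int) []).length := by
    rw [hrow R (by omega)]; omega
  rw [getC, setC, PySem.List.pyGetD_pySetD_natCast _ _ _ _ _ hR]
  by_cases hAR : A = R
  · subst hAR
    rw [if_pos rfl, PySem.List.pyGetD_pySetD_natCast _ _ _ _ _ hC]
    by_cases hBC : B = C
    · subst hBC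
      rw [if_pos rfl, if_pos ⟨rfl, rfl⟩]
    · rw [if_neg hBC, if_neg (fun h => hBC (by exact_mod_cast h.2)), getC]
  · rw [if_neg hAR, if_neg (fun h => hAR (by exact_mod_cast h.1)), getC]

theorem shape_applyOps {n : Nat} (ops : List (Int × Int)) (m : List (List Int))
    (hS : Shape m n) (hops : ∀ p ∈ ops, InB n p) : Shape (applyOps ops m) n := by
  induction ops generalizing m with
  | nil => simpa [applyOps] using hS
  | cons p t ih =>
    simp only [applyOps, List.foldl_cons]
    exact ih _ (shape_setC hS (hops p (by simp))) (fun q hq => hops q (by simp [hq]))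

theorem getC_applyOps {n : Nat} (ops : List (Int × Int)) (m : List (List Int))
    (hS : Shape m n) (hops : ∀ p ∈ ops, InB n p) (a b : Int) (ha : 0 ≤ a) (hb : 0 ≤ b) :
    getC (applyOps ops m) a b = if (a, b) ∈ ops then 1 else getC m a b := by
  induction ops generalizing m with
  | nil => simp [applyOps]
  | cons p t ih =>
    simp only [applyOps, List.foldl_cons]
    rw [show List.foldl (fun m p => setC m p.1 p.2) (setC m p.1 p.2) t
          = applyOps t (setC m p.1 p.2) from rfl]
    rw [ih (setC m p.1 p.2) (shape_setC hS (by simpa using hops p (by simp)))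
          (fun q hq => hops q (by simp [hq]))]
    rw [getC_setC hS (by simpa using hops p (by simp)) a b ha hb]
    by_cases h1 : (a, b) ∈ t
    · simp [h1, List.mem_cons]
    · by_cases h2 : (a, b) = p
      · rw [if_neg h1, if_pos (by cases p; cases h2; exact ⟨rfl, rfl⟩),
          if_pos (List.mem_cons.mpr (Or.inl h2))]
      · rw [if_neg h1, if_neg (fun hh => h2 (by cases p; simp_all)),
          if_neg (fun hh => (List.mem_cons.mp hh).elim h2 h1)]

theorem applyOps_append (xs ys : List (Int × Int)) (m : List (List Int)) :
    applyOps (xs ++ ys) m = applyOps ys (applyOps xs m) := by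
  simp [applyOps, List.foldl_append]

theorem foldl_applyOps {α : Type} (L : List α) (g : α → List (Int × Int)) (m : List (List Int)) :
    L.foldl (fun m x => applyOps (g x) m) m = applyOps (L.flatMap g) m := by
  induction L generalizing m with
  | nil => simp [applyOps]
  | cons h t ih => simp only [List.foldl_cons, List.flatMap_cons, applyOps_append]; exact ih _

theorem foldl_applyOps_congr {α : Type} (L : List α)
    (f : List (List Int) → α → List (List Int)) (g : α → List (Int × Int))
    (h : ∀ m x, f m x = applyOps (g x) m) (m : List (List Int)) :
    L.foldl f m = applyOps (L.flatMap g) m := by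
  rw [show f = fun m x => applyOps (g x) m from funext fun m => funext fun x => h m x]
  exact foldl_applyOps L g m

theorem eq_of_shape_getC {m m' : List (List Int)} {n : Nat} (h1 : Shape m n) (h2 : Shape m' n)
    (h : ∀ i j : Nat, i < n → j < n → getC m (i : Int) (j : Int) = getC m' (i : Int) (j : Int)) :
    m = m' := by
  obtain ⟨l1, r1⟩ := h1
  obtain ⟨l2, r2⟩ := h2
  apply List.ext_getElem (by omega)
  intro i hi1 hi2
  have hrow1 : PySem.List.pyGetD m (i : Int) [] = m[i] := by
    rw [PySem.List.pyGetD_natCast, List.getD_eq_getElem _ _ hi1]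
  have hrow2 : PySem.List.pyGetD m' (i : Int) [] = m'[i] := by
    rw [PySem.List.pyGetD_natCast, List.getD_eq_getElem _ _ hi2]
  have hin : i < n := by omega
  apply List.ext_getElem
  · have := r1 i hin; have := r2 i hin; rw [hrow1] at *; rw [hrow2] at *; omega
  intro j hj1 hj2
  have hjn : j < n := by have := r1 i hin; rw [hrow1] at this; omega
  have := h i j hin hjn
  rw [getC, getC, hrow1, hrow2, PySem.List.pyGetD_natCast, PySem.List.pyGetD_natCast,
    List.getD_eq_getElem _ _ hj1, List.getD_eq_getElem _ _ hj2] at this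
  exact this

-- key of entry a (an in-range index) and the linking condition
def keyOf (be : List (List (String × String))) (key : String) (a : Int) : String :=
  dictGet (PySem.List.pyGetD be a []) key

def condA (be : List (List (String × String))) (j k : Int) : Bool :=
  (keyOf be "e1" j == keyOf be "e1" k) || (keyOf be "e2" j == keyOf be "e2" k)

theorem condA_iff (be : List (List (String × String))) (j k : Int) :
    condA be j k = true ↔
      (keyOf be "e1" j = keyOf be "e1" k ∨ keyOf be "e2" j = keyOf be "e2" k) := by
  simp [condA]

def Edge (be : List (List (String × String))) (a b : Int) : Prop :=
  0 ≤ a ∧ a < (be.length : Int) ∧ 0 ≤ b ∧ b < (be.length : Int) ∧ a ≠ b ∧ condA be a b = true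

def opsA (be : List (List (String × String))) : List (Int × Int) :=
  (PySem.List.pyRange 0 (be.length : Int) 1).flatMap (fun j =>
    (PySem.List.pyRange (j + 1) (be.length : Int) 1).flatMap (fun k =>
      if condA be j k then [(j, k), (k, j)] else []))

def opsB (be : List (List (String × String))) : List (Int × Int) :=
  ["e1", "e2"].flatMap (fun key =>
    (bGroups be key).values.flatMap (fun grp =>
      grp.flatMap (fun a => grp.flatMap (fun b => if a ≠ b then [(a, b)] else []))))

def zeroM (n : Nat) : List (List Int) := List.replicate n (List.replicate n 0)

theorem shape_zeroM (n : Nat) : Shape (zeroM n) n := by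
  refine ⟨by simp [zeroM], ?_⟩
  intro i hi
  rw [PySem.List.pyGetD_natCast, zeroM, List.getD_eq_getElem _ _ (by simp [hi]),
    List.getElem_replicate, List.length_replicate]

theorem A_eq (be : List (List (String × String))) :
    make_graph be = applyOps (opsA be) (zeroM be.length) := by
  unfold make_graph
  simp only []
  have hzero : (PySem.List.pyRange 0 (be.length : Int) 1).map
      (fun _ => (PySem.List.pyRange 0 (be.length : Int) 1).map (fun _ => (0 : Int)))
      = zeroM be.length := by
    rw [List.map_const', List.map_const', PySem.List.length_pyRange_one, zeroM]
    simp
  rw [hzero]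
  refine foldl_applyOps_congr _ _ _ (fun m j => ?_) _
  refine foldl_applyOps_congr _ _ _ (fun m k => ?_) _
  simp only [show ∀ (x : Int) (key : String),
    dictGet (PySem.List.pyGetD be x []) key = keyOf be key x from fun _ _ => rfl]
  by_cases hc : condA be j k = true
  · rw [if_pos ((condA_iff be j k).mp hc), if_pos hc]
    simp [applyOps]
  · rw [if_neg (fun h => hc ((condA_iff be j k).mpr h)), if_neg hc]
    simp [applyOps]

theorem B_eq (be : List (List (String × String))) :
    make_graph_alt be = applyOps (opsB be) (zeroM be.length) := by
  unfold make_graph_alt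
  simp only []
  have hzero : (PySem.List.pyRange 0 (be.length : Int) 1).map
      (fun _ => PySem.List.pyRepeat [(0 : Int)] (be.length : Int)) = zeroM be.length := by
    rw [List.map_const', PySem.List.length_pyRange_one, zeroM]
    simp [PySem.List.pyRepeat_singleton]
  rw [hzero]
  refine foldl_applyOps_congr _ _ _ (fun m key => ?_) _
  refine foldl_applyOps_congr _ _ _ (fun m grp => ?_) _
  refine foldl_applyOps_congr _ _ _ (fun m a => ?_) _
  refine foldl_applyOps_congr _ _ _ (fun m b => ?_) _
  by_cases hab : a ≠ b
  · rw [if_pos hab, if_pos hab]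
    simp [applyOps]
  · rw [if_neg hab, if_neg hab]
    simp [applyOps]

theorem condA_symm {be : List (List (String × String))} {j k : Int}
    (h : condA be j k = true) : condA be k j = true := by
  rw [condA_iff] at *
  cases h with
  | inl h => exact Or.inl h.symm
  | inr h => exact Or.inr h.symm

theorem mem_opsA (be : List (List (String × String))) (a b : Int) :
    (a, b) ∈ opsA be ↔ Edge be a b := by
  unfold opsA Edge
  simp only [List.mem_flatMap, PySem.List.mem_pyRange_one]
  constructor
  · rintro ⟨j, ⟨hj0, hjn⟩, k, ⟨hjk, hkn⟩, hmem⟩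
    by_cases hc : condA be j k = true
    · rw [if_pos hc] at hmem
      simp only [List.mem_cons, Prod.mk.injEq, List.not_mem_nil, or_false] at hmem
      rcases hmem with ⟨rfl, rfl⟩ | ⟨rfl, rfl⟩
      · exact ⟨hj0, by omega, by omega, hkn, by omega, hc⟩
      · exact ⟨by omega, hkn, hj0, by omega, by omega, condA_symm hc⟩
    · rw [if_neg hc] at hmem
      exact absurd hmem (List.not_mem_nil)
  · rintro ⟨ha0, han, hb0, hbn, hab, hc⟩
    by_cases hlt : a < b
    · exact ⟨a, ⟨ha0, by omega⟩, b, ⟨by omega, hbn⟩,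
        by rw [if_pos hc]; exact List.mem_cons_self⟩
    · exact ⟨b, ⟨hb0, by omega⟩, a, ⟨by omega, han⟩,
        by rw [if_pos (condA_symm hc)]
           exact List.mem_cons.mpr (Or.inr List.mem_cons_self)⟩

theorem keyOf_natCast (be : List (List (String × String))) (key : String) (k : Nat)
    (hk : k < be.length) : keyOf be key (k : Int) = dictGet be[k] key := by
  rw [keyOf, PySem.List.pyGetD_natCast, List.getD_eq_getElem _ _ hk]

theorem getD_build (key : String) (v : String) (l : List (Int × List (String × String)))
    (d : PySem.Dict String (List Int)) :
    (l.foldl (fun d p => d.modify (dictGet p.2 key) [] (· ++ [p.1])) d).getD v []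
      = d.getD v [] ++ (l.filter (fun p => dictGet p.2 key == v)).map (fun p => p.1) := by
  induction l generalizing d with
  | nil => simp
  | cons p t ih =>
    simp only [List.foldl_cons, List.filter_cons]
    rw [ih]
    by_cases hv : dictGet p.2 key = v
    · rw [if_pos (by simpa using hv)]
      rw [show (d.modify (dictGet p.2 key) [] (· ++ [p.1])).getD v []
            = d.getD v [] ++ [p.1] from by
          rw [hv, PySem.Dict.getD_modify_self]]
      simp
    · rw [if_neg (by simpa using hv)]
      rw [PySem.Dict.getD_modify_of_ne _ _ _ (fun h => hv h.symm)]

theorem mem_group (be : List (List (String × String))) (key : String) (v : String) (x : Int) :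
    x ∈ (bGroups be key).getD v [] ↔
      0 ≤ x ∧ x < (be.length : Int) ∧ keyOf be key x = v := by
  rw [bGroups, getD_build]
  simp only [PySem.Dict.getD_empty, List.nil_append, List.mem_map, List.mem_filter,
    beq_iff_eq, PySem.List.mem_enumerate_iff]
  constructor
  · rintro ⟨p, ⟨⟨k, hk, hp⟩, hv⟩, rfl⟩
    subst hp
    simp only [zero_add]
    exact ⟨by omega, by omega, by rw [keyOf_natCast be key k hk]; exact hv⟩
  · rintro ⟨hx0, hxn, hv⟩
    obtain ⟨K, rfl⟩ : ∃ K : Nat, x = (K : Int) := ⟨x.toNat, by omega⟩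
    have hK : K < be.length := by omega
    refine ⟨((K : Int), be[K]'hK), ⟨⟨K, hK, by simp⟩, ?_⟩, rfl⟩
    rw [← keyOf_natCast be key K hK]
    exact hv

theorem bGroups_keys_nodup (be : List (List (String × String))) (key : String) :
    (bGroups be key).keys.Nodup := by
  unfold bGroups
  exact PySem.Dict.nodup_keys_foldl_modify_key _
    (fun (p : Int × List (String × String)) => dictGet p.2 key) []
    (fun _ p => (· ++ [p.1])) _ (by simp [PySem.Dict.keys_empty])

theorem mem_bGroups_keys (be : List (List (String × String))) (key : String) (v : String) :
    v ∈ (bGroups be key).keys ↔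
      ∃ (k : Nat) (h : k < be.length), dictGet (be[k]'h) key = v := by
  unfold bGroups
  rw [PySem.Dict.keys_foldl_modify_key _
    (fun (p : Int × List (String × String)) => dictGet p.2 key) []
    (fun _ p => (· ++ [p.1]))]
  rw [show PySem.Set.update PySem.Dict.empty.keys
      ((PySem.List.enumerate be 0).map (fun p => dictGet p.2 key))
      = PySem.Set.ofList ((PySem.List.enumerate be 0).map (fun p => dictGet p.2 key)) from rfl]
  rw [PySem.Set.mem_ofList]
  simp only [List.mem_map, PySem.List.mem_enumerate_iff]
  constructor
  · rintro ⟨p, ⟨k, hk, hp⟩, hv⟩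
    subst hp
    exact ⟨k, hk, hv⟩
  · rintro ⟨k, hk, hv⟩
    exact ⟨((0 : Int) + (k : Int), be[k]'hk), ⟨k, hk, rfl⟩, hv⟩

theorem mem_opsB (be : List (List (String × String))) (a b : Int) :
    (a, b) ∈ opsB be ↔ Edge be a b := by
  unfold opsB Edge
  simp only [List.mem_flatMap]
  constructor
  · rintro ⟨key, hkey, grp, hgrp, x, hx, y, hy, hmem⟩
    by_cases hab : x ≠ y
    · rw [if_pos hab] at hmem
      simp only [List.mem_singleton, Prod.mk.injEq] at hmem
      obtain ⟨rfl, rfl⟩ := hmem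
      have hvals := PySem.Dict.values_eq_map_keys (bGroups be key)
        (bGroups_keys_nodup be key) []
      rw [hvals, List.mem_map] at hgrp
      obtain ⟨v, _, rfl⟩ := hgrp
      rw [mem_group] at hx hy
      obtain ⟨hx0, hxn, hxv⟩ := hx
      obtain ⟨hy0, hyn, hyv⟩ := hy
      have hcond : condA be a b = true := by
        rw [condA_iff]
        simp only [List.mem_cons, List.not_mem_nil, or_false] at hkey
        rcases hkey with rfl | rfl
        · exact Or.inl (by rw [hxv, hyv])
        · exact Or.inr (by rw [hxv, hyv])
      exact ⟨hx0, hxn, hy0, hyn, hab, hcond⟩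
    · rw [if_neg hab] at hmem
      exact absurd hmem (List.not_mem_nil)
  · rintro ⟨ha0, han, hb0, hbn, hab, hc⟩
    have main : ∀ key : String, keyOf be key a = keyOf be key b →
        ∃ grp ∈ (bGroups be key).values,
          ∃ x ∈ grp, ∃ y ∈ grp, (a, b) ∈ if x ≠ y then [(x, y)] else [] := by
      intro key hk
      refine ⟨(bGroups be key).getD (keyOf be key a) [], ?_, a, ?_, b, ?_, ?_⟩
      · rw [PySem.Dict.values_eq_map_keys (bGroups be key) (bGroups_keys_nodup be key) [],
          List.mem_map]
        refine ⟨keyOf be key a, ?_, rfl⟩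
        rw [mem_bGroups_keys]
        obtain ⟨K, rfl⟩ : ∃ K : Nat, a = (K : Int) := ⟨a.toNat, by omega⟩
        exact ⟨K, by omega, (keyOf_natCast be key K (by omega)).symm⟩
      · rw [mem_group]; exact ⟨ha0, han, rfl⟩
      · rw [mem_group]; exact ⟨hb0, hbn, hk.symm⟩
      · rw [if_pos hab]; exact List.mem_singleton.mpr rfl
    rw [condA_iff] at hc
    cases hc with
    | inl h => exact ⟨"e1", by simp, main "e1" h⟩
    | inr h => exact ⟨"e2", by simp, main "e2" h⟩

theorem main_eq (be : List (List (String × String))) : make_graph be = make_graph_alt be := by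
  rw [A_eq, B_eq]
  have hA : ∀ p ∈ opsA be, InB be.length p := by
    rintro ⟨a, b⟩ hp
    rw [mem_opsA] at hp
    exact ⟨hp.1, hp.2.1, hp.2.2.1, hp.2.2.2.1⟩
  have hB : ∀ p ∈ opsB be, InB be.length p := by
    rintro ⟨a, b⟩ hp
    rw [mem_opsB] at hp
    exact ⟨hp.1, hp.2.1, hp.2.2.1, hp.2.2.2.1⟩
  apply eq_of_shape_getC (shape_applyOps _ _ (shape_zeroM _) hA)
    (shape_applyOps _ _ (shape_zeroM _) hB)
  intro i j hi hj
  rw [getC_applyOps _ _ (shape_zeroM _) hA _ _ (by positivity) (by positivity),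
    getC_applyOps _ _ (shape_zeroM _) hB _ _ (by positivity) (by positivity)]
  have hiff : ((i : Int), (j : Int)) ∈ opsA be ↔ ((i : Int), (j : Int)) ∈ opsB be := by
    rw [mem_opsA, mem_opsB]
  split_ifs with h1 h2 h3
  · rfl
  · exact absurd (hiff.mp h1) h2
  · exact absurd (hiff.mpr h3) h1
  · rfl

-- ===== VERDICT (by name: the statement is the Claim_ definition above) =====
theorem make_graph_spec : Claim_equal_make_graph := by
  intro be _ _
  unfold Spec_make_graph
  exact main_eq be
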